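-- pv_equiv track=rewrite | github.com/Casta1164622/ProyectoCompis2024 | ProyectoCompis/map.py | asign
-- ===== SOURCE A (Python) =====
-- def asign(cadena):
--     # Diccionario para guardar las asignaciones
--     asignaciones = {}
--
--     asignaciones['ε'] = 'e'
--     asignaciones['Îµ'] = 'e'
--
--     # Letras para no terminales (mayúsculas) y terminales (minúsculas)
--     letras_mayus = iter([chr(i) for i in range(ord('A'), ord('Z') + 1)])
--     letras_minus = iter([chr(i) for i in range(ord('a'), ord('z') + 1) if chr(i) != 'e'])
--
--     # Caracteres especiales para no terminales cuando se acaben las mayúsculas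
--     caracteres_especiales_mayus = iter(['!', '@', '_', '(', '%', '^', '&', '*', '-', '+'])
--
--     # Caracteres especiales para terminales cuando se acaben las minúsculas
--     caracteres_especiales_minus = iter(['~', '`', '\\', '/', '[', ']', '{', '}', ':', ';', '"', '<', '=', '#', ',', '?'])
--
--     # Separar la cadena en líneas
--     lineas = cadena.splitlines()
--
--     # Procesar cada línea
--     for linea in lineas:
--         # Separar la línea por espacios
--         partes = linea.split(" ")
--
--         # Procesar cada parte
--         for parte in partes:
--             # Si es un no terminal (entre < >)
--             if parte.startswith('<') and parte.endswith('>'):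
--                 if parte not in asignaciones:
--                     # Usar la siguiente letra mayúscula o un carácter especial si se acaban
--                     try:
--                         asignaciones[parte] = next(letras_mayus)
--                     except StopIteration:
--                         asignaciones[parte] = next(caracteres_especiales_mayus)
--             # Si es un terminal (entre ' ')
--             elif parte.startswith("'") and parte.endswith("'"):
--                 if parte not in asignaciones:
--                     # Asignar la siguiente letra minúscula o un carácter especial si se acaban
--                     try:
--                         asignaciones[parte] = next(letras_minus)
--                     except StopIteration:
--                         asignaciones[parte] = next(caracteres_especiales_minus)
--
--     return asignaciones
-- ===== SOURCE B (Python) =====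
-- def asign(cadena):
--     # Stateless formulation: no iterators, no membership test against the output
--     # dict, no running counters.  Each token's symbol is a pure function of the
--     # token stream prefix before it: a pattern token gets a symbol exactly at its
--     # first occurrence, and the symbol is the pool entry at its first-appearance
--     # rank, i.e. the number of distinct same-class tokens occurring strictly
--     # before it.
--     toks = [p for linea in cadena.splitlines() for p in linea.split(" ")]
--     nt_pool = [chr(i) for i in range(65, 91)] + \
--               ['!', '@', '_', '(', '%', '^', '&', '*', '-', '+']
--     t_pool = [chr(i) for i in range(97, 123) if i != 101] + \
--              ['~', '`', '\\', '/', '[', ']', '{', '}', ':', ';', '"', '<', '=', '#', ',', '?']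
--
--     def cls(t):
--         if t.startswith('<') and t.endswith('>'):
--             return 0
--         if t.startswith("'") and t.endswith("'"):
--             return 1
--         return -1
--
--     res = {'ε': 'e', 'Îµ': 'e'}
--     for p, t in enumerate(toks):
--         c = cls(t)
--         if c != -1 and t not in toks[:p]:
--             rank = len({u for u in toks[:p] if cls(u) == c})
--             res[t] = (nt_pool if c == 0 else t_pool)[rank]
--     return res
-- ===== Notes on version B (the rewrite author's own statement) =====
-- stated objective: alternative
-- what changed: B replaces A's stateful single pass (two chained iterators consumed by next()/try-except plus membership tests against the growing output dict) by a stateless rank-based formulation: each token's symbol is a pure function of the token-stream prefix before it -- a pattern token is assigned exactly at its first occurrence (checked against the token list prefix, not the dict) and receives the pool entry indexed by its first-appearance rank, the count of distinct same-class tokens in that prefix; this trades A's stateful scan for per-token prefix scans with no mutable assignment state.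
import Mathlib
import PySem

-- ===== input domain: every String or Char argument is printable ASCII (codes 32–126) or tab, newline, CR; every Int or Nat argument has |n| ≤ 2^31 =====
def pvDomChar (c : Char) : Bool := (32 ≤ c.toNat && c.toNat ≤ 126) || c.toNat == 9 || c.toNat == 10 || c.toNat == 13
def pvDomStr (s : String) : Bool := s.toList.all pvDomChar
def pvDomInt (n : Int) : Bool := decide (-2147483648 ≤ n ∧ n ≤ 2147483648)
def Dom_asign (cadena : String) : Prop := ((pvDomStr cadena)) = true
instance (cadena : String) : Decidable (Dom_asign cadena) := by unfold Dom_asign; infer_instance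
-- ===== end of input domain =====

-- B replaces A's stateful pass (iterators consumed by next(), membership tests on the output
-- dict) by a stateless rank computation: each pattern token is assigned at its first occurrence
-- the pool entry indexed by the count of distinct same-class tokens in the prefix before it.

-- ===== PORT A =====
-- the body of the two nested 'for' loops of A (state: (asignaciones, letras_mayus,
-- caracteres_especiales_mayus, letras_minus, caracteres_especiales_minus); the remaining
-- elements of each iterator are kept as a list, next() = take the head; taking from an
-- empty pair of pools is Python's uncaught StopIteration, excluded by Pre_asign)
def asignParte :
    PySem.Dict String String × List String × List String × List String × List String → String →
    PySem.Dict String String × List String × List String × List String × List String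
  | (d, m, em, n, en), parte =>
    if PySem.Str.startswith parte "<" && PySem.Str.endswith parte ">" then
      if d.contains parte then (d, m, em, n, en)
      else
        match m with
        | c :: rest => (d.insert parte c, rest, em, n, en)
        | [] =>
          match em with
          | c :: rest => (d.insert parte c, [], rest, n, en)
          | [] => (d, [], [], n, en)      -- StopIteration (outside Pre_asign)
    else if PySem.Str.startswith parte "'" && PySem.Str.endswith parte "'" then
      if d.contains parte then (d, m, em, n, en)
      else
        match n with
        | c :: rest => (d.insert parte c, m, em, rest, en)
        | [] =>
          match en with
          | c :: rest => (d.insert parte c, m, em, [], rest)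
          | [] => (d, m, em, [], [])      -- StopIteration (outside Pre_asign)
    else (d, m, em, n, en)

def asign (cadena : String) : List (String × String) :=
  let asignaciones : PySem.Dict String String :=
    ((PySem.Dict.empty).insert "ε" "e").insert "Îµ" "e"
  let letrasMayus : List String :=
    (PySem.List.pyRange 65 91).map (fun i => String.ofList [Char.ofNat i.toNat])
  let letrasMinus : List String :=
    ((PySem.List.pyRange 97 123).map (fun i => String.ofList [Char.ofNat i.toNat])).filter (· != "e")
  let caracteresEspecialesMayus : List String :=
    ["!", "@", "_", "(", "%", "^", "&", "*", "-", "+"]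
  let caracteresEspecialesMinus : List String :=
    ["~", "`", "\\", "/", "[", "]", "{", "}", ":", ";", "\"", "<", "=", "#", ",", "?"]
  let lineas := PySem.Str.splitlines cadena
  let fin := lineas.foldl
    (fun st linea => ((PySem.Str.split? linea " ").getD []).foldl asignParte st)
    (asignaciones, letrasMayus, caracteresEspecialesMayus, letrasMinus, caracteresEspecialesMinus)
  fin.1.items

-- ===== PORT B =====
def asignAltNtPool : List String :=
  (PySem.List.pyRange 65 91).map (fun i => String.ofList [Char.ofNat i.toNat]) ++
    ["!", "@", "_", "(", "%", "^", "&", "*", "-", "+"]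

def asignAltTPool : List String :=
  ((PySem.List.pyRange 97 123).map (fun i => String.ofList [Char.ofNat i.toNat])).filter
      (fun s => s != String.ofList [Char.ofNat 101]) ++
    ["~", "`", "\\", "/", "[", "]", "{", "}", ":", ";", "\"", "<", "=", "#", ",", "?"]

-- Source B's cls(t)
def asignAltCls (t : String) : Int :=
  if PySem.Str.startswith t "<" && PySem.Str.endswith t ">" then 0
  else if PySem.Str.startswith t "'" && PySem.Str.endswith t "'" then 1
  else -1

-- the body of Source B's loop over enumerate(toks); toks[:p] = toks.take p.toNat is exact because
-- enumerate indices are ≥ 0; an out-of-range pool index is Python's IndexError, outside Pre_asign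
def asignAltStep (toks : List String) (res : PySem.Dict String String) (pt : Int × String) :
    PySem.Dict String String :=
  let c := asignAltCls pt.2
  if c != -1 && !(decide (pt.2 ∈ toks.take pt.1.toNat)) then
    let rank := (PySem.Set.ofList ((toks.take pt.1.toNat).filter (fun u => asignAltCls u == c))).length
    match PySem.List.pyGet? (if c == 0 then asignAltNtPool else asignAltTPool) (rank : Int) with
    | some s => res.insert pt.2 s
    | none => res      -- IndexError (outside Pre_asign)
  else res

def asign_alt (cadena : String) : List (String × String) :=
  let toks := (PySem.Str.splitlines cadena).flatMap (fun linea => (PySem.Str.split? linea " ").getD [])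
  ((PySem.List.enumerate toks 0).foldl (asignAltStep toks)
      (((PySem.Dict.empty).insert "ε" "e").insert "Îµ" "e")).items

-- ===== PRECONDITION & SPEC =====
-- token classification and the token list, used by Pre_asign and the proofs
def pvIsNT (t : String) : Bool := PySem.Str.startswith t "<" && PySem.Str.endswith t ">"
def pvIsT (t : String) : Bool := PySem.Str.startswith t "'" && PySem.Str.endswith t "'"
def pvToks (cadena : String) : List String :=
  (PySem.Str.splitlines cadena).flatMap (fun linea => (PySem.Str.split? linea " ").getD [])

-- Pre_ excludes inputs with more than 36 distinct angle-bracketed (non-terminal) tokens or more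
-- than 41 distinct quoted (terminal) tokens: there A exhausts a symbol pool and raises
-- StopIteration (B raises IndexError); on every input where A returns, Pre_ holds.
def Pre_asign (cadena : String) : Prop :=
  (PySem.Set.ofList ((pvToks cadena).filter pvIsNT)).length ≤ 36 ∧
  (PySem.Set.ofList ((pvToks cadena).filter pvIsT)).length ≤ 41

instance (cadena : String) : Decidable (Pre_asign cadena) := by unfold Pre_asign; infer_instance

def pvWitness_asign : String := "<S> 'a'"

def Spec_asign (cadena : String) (out : List (String × String)) : Prop := out = asign_alt cadena
instance (cadena : String) (out : List (String × String)) : Decidable (Spec_asign cadena out) := by unfold Spec_asign; infer_instance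

-- ===== CLAIM (what is proved, stated in full; the proofs are below) =====
def Claim_equal_asign : Prop := ∀ (cadena : String), Dom_asign cadena → Pre_asign cadena → Spec_asign cadena (asign cadena)

-- ===== LEMMAS AND PROOFS =====

-- number of distinct p-tokens of a list (= B's rank of the next fresh p-token after that prefix)
def pvCnt (p : String → Bool) (l : List String) : Nat :=
  (PySem.Set.ofList (l.filter p)).length

lemma pvNT_head {t : String} (h : pvIsNT t = true) : ∃ r, t.toList = '<' :: r := by
  have := (PySem.Chars.startswith_iff t.toList "<".toList).mp
    (by simpa [pvIsNT, PySem.Str.startswith_eq] using (Bool.and_elim_left (by simpa [pvIsNT] using h)))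
  obtain ⟨u, hu⟩ := this
  exact ⟨u, hu.symm⟩

lemma pvT_head {t : String} (h : pvIsT t = true) : ∃ r, t.toList = '\'' :: r := by
  have := (PySem.Chars.startswith_iff t.toList "'".toList).mp
    (by simpa [pvIsT, PySem.Str.startswith_eq] using (Bool.and_elim_left (by simpa [pvIsT] using h)))
  obtain ⟨u, hu⟩ := this
  exact ⟨u, hu.symm⟩

lemma pvNT_not_T {t : String} (h : pvIsNT t = true) : pvIsT t = false := by
  obtain ⟨r, hr⟩ := pvNT_head h
  by_contra hT
  obtain ⟨r', hr'⟩ := pvT_head (by simpa using hT)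
  rw [hr] at hr'; injection hr' with h1 _; exact absurd h1 (by decide)

lemma pvT_not_NT {t : String} (h : pvIsT t = true) : pvIsNT t = false := by
  by_contra hN
  exact absurd h (by simp [pvNT_not_T (by simpa using hN)])

lemma pvMatch_ne {t : String} (h : pvIsNT t = true ∨ pvIsT t = true) :
    t ≠ "ε" ∧ t ≠ "Îµ" := by
  have : ∃ c r, t.toList = c :: r ∧ (c = '<' ∨ c = '\'') := by
    rcases h with h | h
    · obtain ⟨r, hr⟩ := pvNT_head h; exact ⟨_, r, hr, Or.inl rfl⟩
    · obtain ⟨r, hr⟩ := pvT_head h; exact ⟨_, r, hr, Or.inr rfl⟩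
  obtain ⟨c, r, hr, hc⟩ := this
  constructor <;> intro he <;> rw [he] at hr <;> rcases hc with hc | hc <;> simp_all

-- cls versus the two token predicates
lemma pvClsNT {t : String} (h : pvIsNT t = true) : asignAltCls t = 0 := by
  simp only [asignAltCls, show (PySem.Str.startswith t "<" && PySem.Str.endswith t ">") = true from h,
    if_true]

lemma pvClsT {t : String} (h : pvIsT t = true) : asignAltCls t = 1 := by
  have hN : (PySem.Str.startswith t "<" && PySem.Str.endswith t ">") = false := pvT_not_NT h
  simp only [asignAltCls, hN, Bool.false_eq_true, if_false,
    show (PySem.Str.startswith t "'" && PySem.Str.endswith t "'") = true from h, if_true]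

lemma pvClsNone {t : String} (hN : pvIsNT t = false) (hT : pvIsT t = false) :
    asignAltCls t = -1 := by
  simp only [asignAltCls, show (PySem.Str.startswith t "<" && PySem.Str.endswith t ">") = false from hN,
    show (PySem.Str.startswith t "'" && PySem.Str.endswith t "'") = false from hT,
    Bool.false_eq_true, if_false]

lemma pvCls_eq_zero (u : String) : (asignAltCls u == (0 : Int)) = pvIsNT u := by
  by_cases hN : pvIsNT u = true
  · simp [pvClsNT hN, hN]
  · have hN' : pvIsNT u = false := by simpa using hN
    by_cases hT : pvIsT u = true
    · simp [pvClsT hT, hN']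
    · simp [pvClsNone hN' (by simpa using hT), hN']

lemma pvCls_eq_one (u : String) : (asignAltCls u == (1 : Int)) = pvIsT u := by
  by_cases hT : pvIsT u = true
  · simp [pvClsT hT, hT]
  · have hT' : pvIsT u = false := by simpa using hT
    by_cases hN : pvIsNT u = true
    · simp [pvClsNT hN, hT']
    · simp [pvClsNone (by simpa using hN) hT', hT']

-- Set.ofList length is monotone under append
lemma pvFoldlAdd_len (b : List String) : ∀ s : PySem.Set String,
    s.length ≤ (b.foldl PySem.Set.add s).length := by
  induction b with
  | nil => intro s; simp
  | cons x b ih =>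
    intro s
    refine le_trans ?_ (ih (PySem.Set.add s x))
    by_cases h : x ∈ s
    · simp [PySem.Set.add_of_mem h]
    · simp [PySem.Set.add_of_not_mem h]

lemma pvOfList_len_le_append (a b : List String) :
    (PySem.Set.ofList a).length ≤ (PySem.Set.ofList (a ++ b)).length := by
  rw [PySem.Set.ofList_eq_foldl, PySem.Set.ofList_eq_foldl, List.foldl_append]
  exact pvFoldlAdd_len b _

lemma pvCnt_mono (p : String → Bool) (l₁ l₂ : List String) :
    pvCnt p l₁ ≤ pvCnt p (l₁ ++ l₂) := by
  unfold pvCnt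
  rw [List.filter_append]
  exact pvOfList_len_le_append _ _

lemma pvOfList_snoc (l : List String) (t : String) :
    PySem.Set.ofList (l ++ [t]) = PySem.Set.add (PySem.Set.ofList l) t := by
  rw [PySem.Set.ofList_eq_foldl, PySem.Set.ofList_eq_foldl, List.foldl_append]
  rfl

lemma pvCnt_snoc_fresh {p : String → Bool} {t : String} (h : p t = true) {l : List String}
    (hm : t ∉ l) : pvCnt p (l ++ [t]) = pvCnt p l + 1 := by
  unfold pvCnt
  rw [List.filter_append, show [t].filter p = [t] from by simp [h], pvOfList_snoc]
  have : t ∉ PySem.Set.ofList (l.filter p) := by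
    rw [PySem.Set.mem_ofList]
    intro hmem
    exact hm (List.mem_of_mem_filter hmem)
  simp [PySem.Set.add_of_not_mem this]

lemma pvCnt_snoc_not {p : String → Bool} {t : String} (h : p t = false) (l : List String) :
    pvCnt p (l ++ [t]) = pvCnt p l := by
  unfold pvCnt
  rw [List.filter_append, show [t].filter p = [] from by simp [h]]
  simp

lemma pvCnt_snoc_mem {p : String → Bool} {t : String} {l : List String} (hm : t ∈ l) :
    pvCnt p (l ++ [t]) = pvCnt p l := by
  by_cases hp : p t = true
  · unfold pvCnt
    rw [List.filter_append, show [t].filter p = [t] from by simp [hp], pvOfList_snoc]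
    have : t ∈ PySem.Set.ofList (l.filter p) := by
      rw [PySem.Set.mem_ofList]
      exact List.mem_filter.mpr ⟨hm, hp⟩
    simp [PySem.Set.add_of_mem this]
  · exact pvCnt_snoc_not (by simpa using hp) l

lemma pvNtPool_len : asignAltNtPool.length = 36 := by decide
lemma pvTPool_len : asignAltTPool.length = 41 := by decide

-- the main invariant: with toks = pre ++ ts, A's fold over the remaining tokens ts (iterator
-- remainders = pools from the distinct-count of the prefix on, dict's pattern keys = the
-- pattern tokens of the prefix) equals B's fold over the enumerated remaining tokens
lemma pvMain (toks : List String)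
    (hb1 : pvCnt pvIsNT toks ≤ 36) (hb2 : pvCnt pvIsT toks ≤ 41) :
    ∀ (ts pre : List String), toks = pre ++ ts →
    ∀ (d : PySem.Dict String String) (m em n en : List String),
    m ++ em = asignAltNtPool.drop (pvCnt pvIsNT pre) →
    n ++ en = asignAltTPool.drop (pvCnt pvIsT pre) →
    (∀ t, pvIsNT t = true ∨ pvIsT t = true → (d.contains t = true ↔ t ∈ pre)) →
    (ts.foldl asignParte (d, m, em, n, en)).1 =
      (PySem.List.enumerate ts (pre.length : Int)).foldl (asignAltStep toks) d := by
  intro ts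
  induction ts with
  | nil => intro pre _ d m em n en _ _ _; simp [PySem.List.enumerate]
  | cons t ts ih =>
    intro pre htoks d m em n en h1 h2 hseen
    have htake : toks.take pre.length = pre := by
      rw [htoks, List.take_left]
    rw [PySem.List.enumerate_cons, List.foldl_cons, List.foldl_cons]
    have hidx : ((pre.length : Int)).toNat = pre.length := Int.toNat_natCast _
    have hlen' : (pre.length : Int) + 1 = (((pre ++ [t]).length : Nat) : Int) := by
      simp
    have htoks' : toks = (pre ++ [t]) ++ ts := by rw [htoks, List.append_assoc]; rfl
    by_cases hNT : pvIsNT t = true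
    · have hNTb : (PySem.Str.startswith t "<" && PySem.Str.endswith t ">") = true := hNT
      have hc0 : asignAltCls t = 0 := pvClsNT hNT
      by_cases hm : t ∈ pre
      · -- already assigned: both sides skip
        have hcont : d.contains t = true := (hseen t (Or.inl hNT)).mpr hm
        rw [show asignParte (d, m, em, n, en) t = (d, m, em, n, en) from by
          simp only [asignParte, hNTb, hcont, if_true]]
        rw [show asignAltStep toks d ((pre.length : Int), t) = d from by
          simp only [asignAltStep, hidx, htake]
          simp [hm]]
        rw [hlen']
        refine ih (pre ++ [t]) htoks' d m em n en ?_ ?_ ?_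
        · rw [pvCnt_snoc_mem hm]; exact h1
        · rw [pvCnt_snoc_mem hm]; exact h2
        · intro t' ht'
          rw [hseen t' ht']
          constructor
          · intro h; exact List.mem_append_left _ h
          · intro h
            rcases List.mem_append.mp h with h | h
            · exact h
            · simp at h; exact h ▸ hm
      · -- fresh non-terminal
        have hcont : d.contains t = false := by
          cases h' : d.contains t
          · rfl
          · exact absurd ((hseen t (Or.inl hNT)).mp h') hm
        have hrank : (PySem.Set.ofList ((toks.take pre.length).filter
            (fun u => asignAltCls u == asignAltCls t))).length = pvCnt pvIsNT pre := by
          rw [htake, hc0]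
          unfold pvCnt
          rw [show List.filter (fun u => asignAltCls u == (0 : Int)) pre
              = List.filter pvIsNT pre from List.filter_congr (fun u _ => pvCls_eq_zero u)]
        have hlt : pvCnt pvIsNT pre < 36 := by
          have h1' : pvCnt pvIsNT (pre ++ [t]) = pvCnt pvIsNT pre + 1 := pvCnt_snoc_fresh hNT hm
          have h2' := pvCnt_mono pvIsNT (pre ++ [t]) ts
          rw [← htoks'] at h2'
          omega
        set i := pvCnt pvIsNT pre with hi
        have hstepB : asignAltStep toks d ((pre.length : Int), t)
            = d.insert t (asignAltNtPool[i]'(by rw [pvNtPool_len]; exact hlt)) := by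
          simp only [asignAltStep, hidx, hrank]
          rw [show (decide (t ∈ toks.take pre.length)) = false from by rw [htake]; simpa using hm]
          simp only [hc0]
          simp [List.getElem?_eq_getElem (show i < asignAltNtPool.length from by
            rw [pvNtPool_len]; exact hlt)]
        rw [hstepB]
        have hdrop : asignAltNtPool.drop i
            = (asignAltNtPool[i]'(by rw [pvNtPool_len]; exact hlt)) :: asignAltNtPool.drop (i + 1) :=
          List.drop_eq_getElem_cons (by rw [pvNtPool_len]; exact hlt)
        have hsn : ∀ t', pvIsNT t' = true ∨ pvIsT t' = true →
            (((d.insert t (asignAltNtPool[i]'(by rw [pvNtPool_len]; exact hlt))).contains t') = true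
              ↔ t' ∈ pre ++ [t]) := by
          intro t' ht'
          rw [PySem.Dict.contains_insert]
          by_cases he : t' = t
          · simp [he]
          · simp [he, hseen t' ht']
        rw [hdrop] at h1
        have h1t : pvCnt pvIsNT (pre ++ [t]) = i + 1 := pvCnt_snoc_fresh hNT hm
        have h2t : pvCnt pvIsT (pre ++ [t]) = pvCnt pvIsT pre := pvCnt_snoc_not (pvNT_not_T hNT) pre
        rw [hlen']
        cases m with
        | nil =>
          simp only [List.nil_append] at h1
          rw [show asignParte (d, [], em, n, en) t
              = (d.insert t (asignAltNtPool[i]'(by rw [pvNtPool_len]; exact hlt)), [],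
                  asignAltNtPool.drop (i + 1), n, en) from by
            rw [h1]; simp only [asignParte, hNTb, hcont, if_true, Bool.false_eq_true, if_false]]
          exact ih (pre ++ [t]) htoks' _ [] (asignAltNtPool.drop (i + 1)) n en
            (by rw [h1t]; simp) (by rw [h2t]; exact h2) hsn
        | cons c rest =>
          simp only [List.cons_append] at h1
          injection h1 with hc1 h1'
          rw [show asignParte (d, c :: rest, em, n, en) t
              = (d.insert t (asignAltNtPool[i]'(by rw [pvNtPool_len]; exact hlt)), rest, em, n, en) from by
            rw [hc1]; simp only [asignParte, hNTb, hcont, if_true, Bool.false_eq_true, if_false]]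
          exact ih (pre ++ [t]) htoks' _ rest em n en (by rw [h1t]; exact h1') (by rw [h2t]; exact h2) hsn
    · have hNTb : (PySem.Str.startswith t "<" && PySem.Str.endswith t ">") = false := by
        simpa [pvIsNT] using hNT
      by_cases hT : pvIsT t = true
      · have hTb : (PySem.Str.startswith t "'" && PySem.Str.endswith t "'") = true := hT
        have hc1 : asignAltCls t = 1 := pvClsT hT
        by_cases hm : t ∈ pre
        · have hcont : d.contains t = true := (hseen t (Or.inr hT)).mpr hm
          rw [show asignParte (d, m, em, n, en) t = (d, m, em, n, en) from by
            simp only [asignParte, hNTb, hTb, hcont, Bool.false_eq_true, if_false, if_true]]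
          rw [show asignAltStep toks d ((pre.length : Int), t) = d from by
            simp only [asignAltStep, hidx, htake]
            simp [hm]]
          rw [hlen']
          refine ih (pre ++ [t]) htoks' d m em n en ?_ ?_ ?_
          · rw [pvCnt_snoc_mem hm]; exact h1
          · rw [pvCnt_snoc_mem hm]; exact h2
          · intro t' ht'
            rw [hseen t' ht']
            constructor
            · intro h; exact List.mem_append_left _ h
            · intro h
              rcases List.mem_append.mp h with h | h
              · exact h
              · simp at h; exact h ▸ hm
        · have hcont : d.contains t = false := by
            cases h' : d.contains t
            · rfl
            · exact absurd ((hseen t (Or.inr hT)).mp h') hm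
          have hrank : (PySem.Set.ofList ((toks.take pre.length).filter
              (fun u => asignAltCls u == asignAltCls t))).length = pvCnt pvIsT pre := by
            rw [htake, hc1]
            unfold pvCnt
            rw [show List.filter (fun u => asignAltCls u == (1 : Int)) pre
                = List.filter pvIsT pre from List.filter_congr (fun u _ => pvCls_eq_one u)]
          have hlt : pvCnt pvIsT pre < 41 := by
            have h1' : pvCnt pvIsT (pre ++ [t]) = pvCnt pvIsT pre + 1 := pvCnt_snoc_fresh hT hm
            have h2' := pvCnt_mono pvIsT (pre ++ [t]) ts
            rw [← htoks'] at h2'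
            omega
          set j := pvCnt pvIsT pre with hj
          have hstepB : asignAltStep toks d ((pre.length : Int), t)
              = d.insert t (asignAltTPool[j]'(by rw [pvTPool_len]; exact hlt)) := by
            simp only [asignAltStep, hidx, hrank]
            rw [show (decide (t ∈ toks.take pre.length)) = false from by rw [htake]; simpa using hm]
            simp only [hc1]
            simp [List.getElem?_eq_getElem (show j < asignAltTPool.length from by
              rw [pvTPool_len]; exact hlt)]
          rw [hstepB]
          have hdrop : asignAltTPool.drop j
              = (asignAltTPool[j]'(by rw [pvTPool_len]; exact hlt)) :: asignAltTPool.drop (j + 1) :=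
            List.drop_eq_getElem_cons (by rw [pvTPool_len]; exact hlt)
          have hsn : ∀ t', pvIsNT t' = true ∨ pvIsT t' = true →
              (((d.insert t (asignAltTPool[j]'(by rw [pvTPool_len]; exact hlt))).contains t') = true
                ↔ t' ∈ pre ++ [t]) := by
            intro t' ht'
            rw [PySem.Dict.contains_insert]
            by_cases he : t' = t
            · simp [he]
            · simp [he, hseen t' ht']
          rw [hdrop] at h2
          have h1t : pvCnt pvIsNT (pre ++ [t]) = pvCnt pvIsNT pre := pvCnt_snoc_not (pvT_not_NT hT) pre
          have h2t : pvCnt pvIsT (pre ++ [t]) = j + 1 := pvCnt_snoc_fresh hT hm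
          rw [hlen']
          cases n with
          | nil =>
            simp only [List.nil_append] at h2
            rw [show asignParte (d, m, em, [], en) t
                = (d.insert t (asignAltTPool[j]'(by rw [pvTPool_len]; exact hlt)), m, em, [],
                    asignAltTPool.drop (j + 1)) from by
              rw [h2]; simp only [asignParte, hNTb, hTb, hcont, if_true, Bool.false_eq_true, if_false]]
            exact ih (pre ++ [t]) htoks' _ m em [] (asignAltTPool.drop (j + 1))
              (by rw [h1t]; exact h1) (by rw [h2t]; simp) hsn
          | cons c rest =>
            simp only [List.cons_append] at h2
            injection h2 with hc2 h2'
            rw [show asignParte (d, m, em, c :: rest, en) t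
                = (d.insert t (asignAltTPool[j]'(by rw [pvTPool_len]; exact hlt)), m, em, rest, en) from by
              rw [hc2]; simp only [asignParte, hNTb, hTb, hcont, if_true, Bool.false_eq_true, if_false]]
            exact ih (pre ++ [t]) htoks' _ m em rest en (by rw [h1t]; exact h1) (by rw [h2t]; exact h2') hsn
      · -- not a token of either shape: both sides skip
        have hTb : (PySem.Str.startswith t "'" && PySem.Str.endswith t "'") = false := by
          simpa [pvIsT] using hT
        have hN' : pvIsNT t = false := by simpa using hNT
        have hT' : pvIsT t = false := by simpa using hT
        rw [show asignParte (d, m, em, n, en) t = (d, m, em, n, en) from by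
          simp only [asignParte, hNTb, hTb, Bool.false_eq_true, if_false]]
        rw [show asignAltStep toks d ((pre.length : Int), t) = d from by
          simp only [asignAltStep, pvClsNone hN' hT']
          rw [show ((-1 : Int) != -1) = false from by decide]
          simp]
        rw [hlen']
        refine ih (pre ++ [t]) htoks' d m em n en ?_ ?_ ?_
        · rw [pvCnt_snoc_not hN']; exact h1
        · rw [pvCnt_snoc_not hT']; exact h2
        · intro t' ht'
          have hne : t' ≠ t := by
            rintro rfl
            rcases ht' with h | h
            · rw [hN'] at h; exact absurd h (by decide)
            · rw [hT'] at h; exact absurd h (by decide)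
          rw [hseen t' ht']
          simp [hne]

lemma pvNested_eq_flat (lineas : List String)
    (st : PySem.Dict String String × List String × List String × List String × List String) :
    lineas.foldl (fun st linea => ((PySem.Str.split? linea " ").getD []).foldl asignParte st) st =
      (lineas.flatMap (fun linea => (PySem.Str.split? linea " ").getD [])).foldl asignParte st := by
  induction lineas generalizing st with
  | nil => rfl
  | cons l ls ih => simp [List.flatMap_cons, List.foldl_append, ih]

def pvD0 : PySem.Dict String String := (PySem.Dict.empty.insert "ε" "e").insert "Îµ" "e"

lemma pvAsign_eq (cadena : String) : asign cadena =
    ((PySem.Str.splitlines cadena).foldl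
      (fun st linea => ((PySem.Str.split? linea " ").getD []).foldl asignParte st)
      (pvD0, (PySem.List.pyRange 65 91).map (fun i => String.ofList [Char.ofNat i.toNat]),
        ["!", "@", "_", "(", "%", "^", "&", "*", "-", "+"],
        ((PySem.List.pyRange 97 123).map (fun i => String.ofList [Char.ofNat i.toNat])).filter (· != "e"),
        ["~", "`", "\\", "/", "[", "]", "{", "}", ":", ";", "\"", "<", "=", "#", ",", "?"])).1.items := rfl

lemma pvAsignAlt_eq (cadena : String) : asign_alt cadena =
    ((PySem.List.enumerate (pvToks cadena) 0).foldl (asignAltStep (pvToks cadena)) pvD0).items := rfl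

lemma pvD0_contains (t : String) (h : pvIsNT t = true ∨ pvIsT t = true) :
    pvD0.contains t = false := by
  have hit : pvD0.items = [("ε", "e"), ("Îµ", "e")] := rfl
  rw [PySem.Dict.contains, hit]
  obtain ⟨hne1, hne2⟩ := pvMatch_ne h
  simp [Ne.symm hne1, Ne.symm hne2]

-- ===== VERDICT (by name: the statement is the Claim_ definition above) =====
theorem asign_spec : Claim_equal_asign := by
  intro cadena _ hpre
  unfold Spec_asign
  rw [pvAsign_eq, pvAsignAlt_eq, pvNested_eq_flat]
  rw [show (PySem.Str.splitlines cadena).flatMap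
      (fun linea => (PySem.Str.split? linea " ").getD []) = pvToks cadena from rfl]
  obtain ⟨hpre1, hpre2⟩ := hpre
  have := pvMain (pvToks cadena) hpre1 hpre2 (pvToks cadena) [] rfl pvD0
    ((PySem.List.pyRange 65 91).map (fun i => String.ofList [Char.ofNat i.toNat]))
    ["!", "@", "_", "(", "%", "^", "&", "*", "-", "+"]
    (((PySem.List.pyRange 97 123).map (fun i => String.ofList [Char.ofNat i.toNat])).filter (· != "e"))
    ["~", "`", "\\", "/", "[", "]", "{", "}", ":", ";", "\"", "<", "=", "#", ",", "?"]
    (by rfl) (by rfl)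
    (by intro t ht; simp [pvD0_contains t ht])
  rw [show ((0 : Int)) = ((([] : List String).length : Nat) : Int) from by norm_num] 
  exact congrArg PySem.Dict.items this
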